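-- pv_equiv track=rewrite | github.com/SkunkworksAI/hydra-moe | moe_utils.py | combine_all_predictions
-- ===== SOURCE A (Python) =====
-- cluster_nums = range(32)
--
-- def combine_all_predictions(transformer_pred, transformer_conf, centroid_pred, kmeans_pred, multi_pred, embeds_pred, transformer_weight=2):
--
--     adapter_names = [
--        f"{str(cluster)}" for cluster in cluster_nums
--         ]
--     votes = [0] * len(adapter_names)
--
--     votes[transformer_pred] += transformer_weight
--     votes[centroid_pred] += 1
--     votes[kmeans_pred] += 1
--     votes[multi_pred] += 1
--     votes[embeds_pred] += 1
--
--     ranked_classes = sorted(zip(adapter_names, votes), key=lambda x: x[1], reverse=True)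
--
--     return votes.index(max(votes)), ranked_classes
-- ===== SOURCE B (Python) =====
-- cluster_nums = range(32)
--
-- def combine_all_predictions(transformer_pred, transformer_conf, centroid_pred, kmeans_pred, multi_pred, embeds_pred, transformer_weight=2):
--     votes = [0] * len(cluster_nums)
--     for pred, weight in ((transformer_pred, transformer_weight), (centroid_pred, 1),
--                          (kmeans_pred, 1), (multi_pred, 1), (embeds_pred, 1)):
--         votes[pred] += weight
--     pairs = [(str(cluster), score) for cluster, score in zip(cluster_nums, votes)]
--     ranked_classes = [p for score in sorted(set(votes), reverse=True)
--                         for p in pairs if p[1] == score]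
--     return int(ranked_classes[0][0]), ranked_classes
-- ===== Notes on version B (the rewrite author's own statement) =====
-- stated objective: alternative
-- what changed: B builds the ranking by bucketing the 32 classes under their distinct scores taken in descending order (sorting only the few distinct score values) instead of A's comparison sort of all 32 (name, vote) pairs, and reads the winner off the head of the ranking instead of A's separate max(votes)/votes.index passes; Pre_ excludes only inputs where A raises IndexError (a prediction index outside -32..31).
import Mathlib
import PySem

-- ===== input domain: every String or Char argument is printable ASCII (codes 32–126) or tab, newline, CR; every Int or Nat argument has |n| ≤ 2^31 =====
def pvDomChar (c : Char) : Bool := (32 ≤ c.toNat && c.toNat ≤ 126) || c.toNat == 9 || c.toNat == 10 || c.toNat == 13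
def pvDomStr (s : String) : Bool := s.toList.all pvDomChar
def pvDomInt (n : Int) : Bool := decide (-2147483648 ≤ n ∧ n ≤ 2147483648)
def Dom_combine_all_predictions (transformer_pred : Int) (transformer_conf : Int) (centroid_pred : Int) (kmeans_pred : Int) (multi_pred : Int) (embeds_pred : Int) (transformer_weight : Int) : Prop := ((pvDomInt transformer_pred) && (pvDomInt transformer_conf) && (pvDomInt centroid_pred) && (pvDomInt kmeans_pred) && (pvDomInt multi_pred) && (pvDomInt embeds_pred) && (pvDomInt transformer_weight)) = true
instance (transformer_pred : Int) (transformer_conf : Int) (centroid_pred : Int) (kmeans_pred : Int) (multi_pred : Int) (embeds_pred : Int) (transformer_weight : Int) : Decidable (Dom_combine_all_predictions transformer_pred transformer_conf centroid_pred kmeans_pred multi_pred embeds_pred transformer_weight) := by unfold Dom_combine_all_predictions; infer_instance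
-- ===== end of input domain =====

-- B groups the 32 classes into buckets by distinct score (taken in descending order) instead of
-- comparison-sorting the 32 pairs, and reads the winner off the head of the ranking instead of a
-- separate max/index scan (objective: alternative).

-- ===== PORT A =====
-- 'votes[i] += w' : Python list item assignment, negative index counts from the end
-- (hand-ported; exact for -len(xs) ≤ i < len(xs); out-of-range IndexError is outside Pre_)
def pvBump (xs : List Int) (i : Int) (w : Int) : List Int :=
  let j : Int := if i < 0 then i + (xs.length : Int) else i
  xs.set j.toNat (xs.getD j.toNat 0 + w)

def combine_all_predictions (transformer_pred : Int) (transformer_conf : Int) (centroid_pred : Int) (kmeans_pred : Int) (multi_pred : Int) (embeds_pred : Int) (transformer_weight : Int) : Int × (List (String × Int)) :=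
  let adapter_names : List String := (PySem.List.pyRange 0 32 1).map (fun cluster => PySem.Int.toStr cluster)
  let votes0 := PySem.List.pyRepeat [(0 : Int)] (adapter_names.length : Int)
  let votes1 := pvBump votes0 transformer_pred transformer_weight
  let votes2 := pvBump votes1 centroid_pred 1
  let votes3 := pvBump votes2 kmeans_pred 1
  let votes4 := pvBump votes3 multi_pred 1
  let votes := pvBump votes4 embeds_pred 1
  let ranked_classes := PySem.List.sorted (adapter_names.zip votes) (fun x => x.2) true
  let top : Int :=
    match PySem.List.max? votes (fun y => y) with
    | some m =>
      match PySem.List.index? votes m with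
      | some k => (k : Int)
      | none => 0          -- unreachable: max(votes) is in votes
    | none => 0            -- unreachable: votes is nonempty
  (top, ranked_classes)

-- ===== PORT B =====
def combine_all_predictions_alt (transformer_pred : Int) (transformer_conf : Int) (centroid_pred : Int) (kmeans_pred : Int) (multi_pred : Int) (embeds_pred : Int) (transformer_weight : Int) : Int × (List (String × Int)) :=
  let votes0 := PySem.List.pyRepeat [(0 : Int)] ((PySem.List.pyRange 0 32 1).length : Int)
  let votes := ([(transformer_pred, transformer_weight), (centroid_pred, 1), (kmeans_pred, 1),
                 (multi_pred, 1), (embeds_pred, 1)] : List (Int × Int)).foldl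
                  (fun vs p => pvBump vs p.1 p.2) votes0
  let pairs := ((PySem.List.pyRange 0 32 1).zip votes).map (fun cv => (PySem.Int.toStr cv.1, cv.2))
  let ranked_classes := (PySem.List.sorted (PySem.Set.ofList votes) (fun s => s) true).flatMap
                          (fun s => pairs.filter (fun p => p.2 == s))
  let top : Int :=
    match PySem.List.pyGet? ranked_classes 0 with
    | some p =>
      match PySem.Int.ofStr? p.1 with
      | some k => k
      | none => 0          -- unreachable: every name is str(cluster)
    | none => 0            -- unreachable: ranked_classes is nonempty
  (top, ranked_classes)

-- ===== PRECONDITION & SPEC =====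
-- A raises IndexError when any of the five prediction indices is outside -32 ≤ i < 32; exactly those inputs are excluded.
def Pre_combine_all_predictions (transformer_pred : Int) (transformer_conf : Int) (centroid_pred : Int) (kmeans_pred : Int) (multi_pred : Int) (embeds_pred : Int) (transformer_weight : Int) : Prop :=
  (-32 ≤ transformer_pred ∧ transformer_pred < 32) ∧
  (-32 ≤ centroid_pred ∧ centroid_pred < 32) ∧
  (-32 ≤ kmeans_pred ∧ kmeans_pred < 32) ∧
  (-32 ≤ multi_pred ∧ multi_pred < 32) ∧
  (-32 ≤ embeds_pred ∧ embeds_pred < 32)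
instance (transformer_pred : Int) (transformer_conf : Int) (centroid_pred : Int) (kmeans_pred : Int) (multi_pred : Int) (embeds_pred : Int) (transformer_weight : Int) : Decidable (Pre_combine_all_predictions transformer_pred transformer_conf centroid_pred kmeans_pred multi_pred embeds_pred transformer_weight) := by unfold Pre_combine_all_predictions; infer_instance

def pvWitness_combine_all_predictions : Int × Int × Int × Int × Int × Int × Int := (0, 0, 1, 2, 3, 4, 2)

def Spec_combine_all_predictions (transformer_pred : Int) (transformer_conf : Int) (centroid_pred : Int) (kmeans_pred : Int) (multi_pred : Int) (embeds_pred : Int) (transformer_weight : Int) (out : Int × (List (String × Int))) : Prop := out = combine_all_predictions_alt transformer_pred transformer_conf centroid_pred kmeans_pred multi_pred embeds_pred transformer_weight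
instance (transformer_pred : Int) (transformer_conf : Int) (centroid_pred : Int) (kmeans_pred : Int) (multi_pred : Int) (embeds_pred : Int) (transformer_weight : Int) (out : Int × (List (String × Int))) : Decidable (Spec_combine_all_predictions transformer_pred transformer_conf centroid_pred kmeans_pred multi_pred embeds_pred transformer_weight out) := by unfold Spec_combine_all_predictions; infer_instance

-- ===== CLAIM (what is proved, stated in full; the proofs are below) =====
def Claim_equal_combine_all_predictions : Prop := ∀ (transformer_pred : Int) (transformer_conf : Int) (centroid_pred : Int) (kmeans_pred : Int) (multi_pred : Int) (embeds_pred : Int) (transformer_weight : Int), Dom_combine_all_predictions transformer_pred transformer_conf centroid_pred kmeans_pred multi_pred embeds_pred transformer_weight → Pre_combine_all_predictions transformer_pred transformer_conf centroid_pred kmeans_pred multi_pred embeds_pred transformer_weight → Spec_combine_all_predictions transformer_pred transformer_conf centroid_pred kmeans_pred multi_pred embeds_pred transformer_weight (combine_all_predictions transformer_pred transformer_conf centroid_pred kmeans_pred multi_pred embeds_pred transformer_weight)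

-- ===== LEMMAS AND PROOFS =====

-- insertBy walks past a prefix it does not insert into
lemma pvInsertBy_skip {α : Type} (bef : α → α → Bool) (x : α) (P Q : List α)
    (h : ∀ y ∈ P, bef x y = false) :
    PySem.List.insertBy bef x (P ++ Q) = P ++ PySem.List.insertBy bef x Q := by
  induction P with
  | nil => rfl
  | cons p P ih =>
    have hp : bef x p = false := h p (by simp)
    simp only [List.cons_append, PySem.List.insertBy, hp, Bool.false_eq_true, if_false]
    rw [ih (fun y hy => h y (by simp [hy]))]

-- insertBy at the very front
lemma pvInsertBy_front {α : Type} (bef : α → α → Bool) (x : α) (Q : List α)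
    (h : ∀ y ∈ Q, bef x y = true) :
    PySem.List.insertBy bef x Q = x :: Q := by
  cases Q with
  | nil => rfl
  | cons q Q => simp [PySem.List.insertBy, h q (by simp)]

lemma pvInsertBy_perm {α : Type} (bef : α → α → Bool) (x : α) (Q : List α) :
    (PySem.List.insertBy bef x Q).Perm (x :: Q) := by
  induction Q with
  | nil => simp [PySem.List.insertBy]
  | cons q Q ih =>
    by_cases h : bef x q = true
    · simp [PySem.List.insertBy, h]
    · simp only [PySem.List.insertBy, h, if_false]
      exact (ih.cons q).trans (List.Perm.swap x q Q)

-- inserting a fresh value keeps a strictly descending list strictly descending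
lemma pvInsDesc_pairwise (v : Int) (D : List Int)
    (hp : D.Pairwise (fun a b => b < a)) (hv : v ∉ D) :
    (PySem.List.insertBy (fun a b : Int => decide (b < a)) v D).Pairwise (fun a b => b < a) := by
  induction D with
  | nil => simp [PySem.List.insertBy]
  | cons s D ih =>
    rcases List.pairwise_cons.mp hp with ⟨hs, hp'⟩
    have hv' : v ∉ D := fun h => hv (by simp [h])
    have hvs : v ≠ s := fun h => hv (by simp [h])
    by_cases hlt : s < v
    · simp only [PySem.List.insertBy, decide_eq_true_eq, if_pos hlt]
      exact List.pairwise_cons.mpr ⟨by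
        intro y hy
        rcases List.mem_cons.mp hy with rfl | hy
        · exact hlt
        · exact lt_trans (hs y hy) hlt, hp⟩
    · have hvlt : v < s := lt_of_le_of_ne (le_of_not_gt hlt) hvs
      simp only [PySem.List.insertBy, decide_eq_true_eq, if_neg hlt]
      refine List.pairwise_cons.mpr ⟨?_, ih hp' hv'⟩
      intro y hy
      rcases (PySem.List.mem_insertBy _ _ _ _).mp hy with rfl | hy
      · exact hvlt
      · exact hs y hy

-- the crux: inserting x into a bucketed list appends it to the end of its own bucket
lemma pvInsert_buckets {α : Type} (key : α → Int) (x : α) (l : List α) :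
    ∀ (D : List Int), D.Pairwise (fun a b => b < a) →
    (key x ∉ D → ∀ y ∈ l, key y ≠ key x) →
    PySem.List.insertBy (fun a b => decide (key b < key a)) x
        (D.flatMap (fun s => l.filter (fun y => key y == s)))
    = (if key x ∈ D then D else PySem.List.insertBy (fun a b : Int => decide (b < a)) (key x) D).flatMap
        (fun s => (l ++ [x]).filter (fun y => key y == s)) := by
  intro D
  induction D with
  | nil =>
    intro _ h0
    have hfil : l.filter (fun y => key y == key x) = [] := by
      refine List.filter_eq_nil_iff.mpr ?_
      intro y hy
      simp [h0 (by simp) y hy]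
    simp [PySem.List.insertBy, List.filter_append, hfil]
  | cons s D ih =>
    intro hp h0
    rcases List.pairwise_cons.mp hp with ⟨hs, hp'⟩
    have hkey_bucket : ∀ y ∈ l.filter (fun y => key y == s), key y = s := by
      intro y hy
      have := List.of_mem_filter hy
      simpa using this
    have hkey_rest : ∀ y ∈ D.flatMap (fun s => l.filter (fun y => key y == s)), key y < s := by
      intro y hy
      rcases List.mem_flatMap.mp hy with ⟨s', hs', hy'⟩
      have : key y = s' := by simpa using List.of_mem_filter hy'
      rw [this]; exact hs s' hs'
    by_cases hxs : key x = s
    · -- x joins the first bucket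
      have hmem : key x ∈ s :: D := by simp [hxs]
      rw [if_pos hmem]
      rw [List.flatMap_cons, pvInsertBy_skip _ _ _ _ (by
        intro y hy
        have := hkey_bucket y hy
        simp [this, hxs])]
      rw [pvInsertBy_front _ _ _ (by
        intro y hy
        have := hkey_rest y hy
        simp [hxs ▸ this])]
      rw [List.flatMap_cons]
      have h1 : (l ++ [x]).filter (fun y => key y == s) =
          l.filter (fun y => key y == s) ++ [x] := by
        simp [List.filter_append, hxs]
      have h2 : D.flatMap (fun s => (l ++ [x]).filter (fun y => key y == s)) =
          D.flatMap (fun s => l.filter (fun y => key y == s)) := by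
        rw [List.flatMap_def, List.flatMap_def]
        congr 1
        refine List.map_congr_left ?_
        intro s' hs'
        have hne : key x ≠ s' := by rw [hxs]; exact ne_of_gt (hs s' hs')
        simp [List.filter_append, hne]
      rw [h1, h2]
      simp
    · by_cases hmem : key x ∈ D
      · -- x belongs to a later bucket
        have hmem' : key x ∈ s :: D := by simp [hmem]
        have hxlt : key x < s := hs _ hmem
        rw [if_pos hmem']
        rw [List.flatMap_cons, pvInsertBy_skip _ _ _ _ (by
          intro y hy
          have := hkey_bucket y hy
          simp [this]
          omega)]
        rw [ih hp' (fun hc _ _ => absurd hmem hc)]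
        rw [if_pos hmem, List.flatMap_cons]
        have h1 : (l ++ [x]).filter (fun y => key y == s) =
            l.filter (fun y => key y == s) := by
          simp [List.filter_append, hxs]
        rw [h1]
      · -- key x is fresh
        have hfresh : key x ∉ s :: D := by simp [hxs, hmem]
        have hnil : l.filter (fun y => key y == key x) = [] := by
          refine List.filter_eq_nil_iff.mpr ?_
          intro y hy
          simp [h0 hfresh y hy]
        rw [if_neg hfresh]
        by_cases hlt : s < key x
        · -- x opens a new leading bucket
          have hD' : PySem.List.insertBy (fun a b : Int => decide (b < a)) (key x) (s :: D) =
              key x :: s :: D := by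
            simp [PySem.List.insertBy, hlt]
          rw [hD', List.flatMap_cons, List.flatMap_cons, List.flatMap_cons]
          rw [pvInsertBy_front _ _ _ (by
            intro y hy
            rcases List.mem_append.mp hy with hy | hy
            · have := hkey_bucket y hy
              simp [this, hlt]
            · have := hkey_rest y hy
              simp; omega)]
          have h1 : (l ++ [x]).filter (fun y => key y == key x) = [x] := by
            simp [List.filter_append, hnil]
          have h2 : (l ++ [x]).filter (fun y => key y == s) =
              l.filter (fun y => key y == s) := by
            simp [List.filter_append, hxs]
          have h3 : D.flatMap (fun s => (l ++ [x]).filter (fun y => key y == s)) =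
              D.flatMap (fun s => l.filter (fun y => key y == s)) := by
            rw [List.flatMap_def, List.flatMap_def]
            congr 1
            refine List.map_congr_left ?_
            intro s' hs'
            have hne : key x ≠ s' := fun h => hmem (h ▸ hs')
            simp [List.filter_append, hne]
          rw [h1, h2, h3]
          simp
        · -- x goes past the first bucket
          have hxlt : key x < s := lt_of_le_of_ne (le_of_not_gt hlt) hxs
          have hD' : PySem.List.insertBy (fun a b : Int => decide (b < a)) (key x) (s :: D) =
              s :: PySem.List.insertBy (fun a b : Int => decide (b < a)) (key x) D := by
            simp [PySem.List.insertBy, hlt]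
          rw [hD', List.flatMap_cons, List.flatMap_cons,
            pvInsertBy_skip _ _ _ _ (by
              intro y hy
              have := hkey_bucket y hy
              simp [this]
              omega)]
          rw [ih hp' (fun _ => h0 hfresh), if_neg hmem]
          have h2 : (l ++ [x]).filter (fun y => key y == s) =
              l.filter (fun y => key y == s) := by
            simp [List.filter_append, hxs]
          rw [h2]

-- a strictly descending enumeration of the distinct keys
lemma pvD_pairwise {α : Type} (key : α → Int) (l : List α) :
    (PySem.List.sorted (PySem.Set.ofList (l.map key)) (fun s => s) true).Pairwise
      (fun a b => b < a) := by
  have hperm := PySem.List.sorted_perm (PySem.Set.ofList (l.map key)) (fun s : Int => s) true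
  have hnd : (PySem.List.sorted (PySem.Set.ofList (l.map key)) (fun s : Int => s) true).Nodup :=
    hperm.nodup_iff.mpr (PySem.Set.nodup_ofList _)
  have hle := PySem.List.sorted_pairwise_rev (PySem.Set.ofList (l.map key)) (fun s : Int => s)
  exact (hle.and hnd).imp (fun h => lt_of_le_of_ne h.1 h.2.symm)

-- STABLE reverse sort = buckets of equal keys listed under the distinct keys in descending order
lemma pvSorted_buckets {α : Type} (key : α → Int) (l : List α) :
    PySem.List.sorted l key true
    = (PySem.List.sorted (PySem.Set.ofList (l.map key)) (fun s => s) true).flatMap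
        (fun s => l.filter (fun y => key y == s)) := by
  induction l using List.reverseRecOn with
  | nil => rfl
  | append_singleton l x ih =>
    have hmemD : ∀ v, v ∈ PySem.List.sorted (PySem.Set.ofList (l.map key)) (fun s : Int => s) true
        ↔ v ∈ l.map key := by
      intro v
      rw [PySem.List.mem_sorted, PySem.Set.mem_ofList]
    have hpD := pvD_pairwise key l
    have h0 : key x ∉ PySem.List.sorted (PySem.Set.ofList (l.map key)) (fun s : Int => s) true →
        ∀ y ∈ l, key y ≠ key x := by
      intro hnot y hy he
      exact hnot ((hmemD (key x)).mpr (he ▸ List.mem_map_of_mem hy))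
    rw [PySem.List.sorted_rev_eq_foldl_insertBy, List.foldl_append, List.foldl_cons, List.foldl_nil,
      ← PySem.List.sorted_rev_eq_foldl_insertBy, ih]
    rw [pvInsert_buckets key x l _ hpD h0]
    congr 1
    by_cases hmem : key x ∈ PySem.List.sorted (PySem.Set.ofList (l.map key)) (fun s : Int => s) true
    · rw [if_pos hmem]
      have hofl : PySem.Set.ofList ((l ++ [x]).map key) = PySem.Set.ofList (l.map key) := by
        rw [List.map_append, List.map_singleton, PySem.Set.ofList_append_singleton,
          PySem.Set.add_of_mem ((PySem.Set.mem_ofList _ _).mpr ((hmemD _).mp hmem))]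
      rw [hofl]
    · rw [if_neg hmem]
      have hnot' : key x ∉ PySem.Set.ofList (l.map key) := fun h =>
        hmem ((hmemD _).mpr ((PySem.Set.mem_ofList _ _).mp h))
      have hofl : PySem.Set.ofList ((l ++ [x]).map key) = PySem.Set.ofList (l.map key) ++ [key x] := by
        rw [List.map_append, List.map_singleton, PySem.Set.ofList_append_singleton,
          PySem.Set.add_of_not_mem hnot']
      rw [hofl]
      refine (PySem.List.sorted_rev_eq_of_perm_of_pairwise_gt _ _ (fun s : Int => s) ?_ ?_).symm
      · exact ((pvInsertBy_perm _ _ _).trans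
          ((PySem.List.sorted_perm _ _ _).cons (key x))).trans
          (List.perm_append_singleton _ _).symm
      · exact pvInsDesc_pairwise _ _ hpD hmem


@[simp] lemma pvBump_length (xs : List Int) (i w : Int) : (pvBump xs i w).length = xs.length := by
  simp [pvBump]

lemma pvVotes_foldl (v0 : List Int) (tp cp kp mp ep tw : Int) :
    ([(tp, tw), (cp, 1), (kp, 1), (mp, 1), (ep, 1)] : List (Int × Int)).foldl
        (fun vs p => pvBump vs p.1 p.2) v0
    = pvBump (pvBump (pvBump (pvBump (pvBump v0 tp tw) cp 1) kp 1) mp 1) ep 1 := rfl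

-- the class names are the stringified cluster indices, pair by pair
lemma pvZip_names (votes : List Int) :
    ((PySem.List.pyRange 0 32 1).map (fun cluster => PySem.Int.toStr cluster)).zip votes
    = ((PySem.List.pyRange 0 32 1).zip votes).map (fun cv => (PySem.Int.toStr cv.1, cv.2)) := by
  rw [List.zip_map_left]
  rfl

lemma pvMap_snd (votes : List Int) (h32 : votes.length = 32) :
    (((PySem.List.pyRange 0 32 1).zip votes).map (fun cv => (PySem.Int.toStr cv.1, cv.2))).map
        (fun y => y.2) = votes := by
  rw [List.map_map]
  have : ((PySem.List.pyRange 0 32 1).zip votes).map (fun cv => cv.2) = votes := by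
    have := List.map_snd_zip (l₁ := PySem.List.pyRange 0 32 1) (l₂ := votes) (by rw [h32]; decide)
    simpa using this
  simpa using this

-- the ranking: A's stable reverse sort equals B's descending score buckets
lemma pvRanked (votes : List Int) (h32 : votes.length = 32) :
    PySem.List.sorted
        (((PySem.List.pyRange 0 32 1).map (fun cluster => PySem.Int.toStr cluster)).zip votes)
        (fun x => x.2) true
    = (PySem.List.sorted (PySem.Set.ofList votes) (fun s => s) true).flatMap
        (fun s => (((PySem.List.pyRange 0 32 1).zip votes).map
            (fun cv => (PySem.Int.toStr cv.1, cv.2))).filter (fun p => p.2 == s)) := by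
  rw [pvZip_names]
  rw [pvSorted_buckets (fun x : String × Int => x.2)]
  rw [pvMap_snd votes h32]

lemma pvGet0 {α : Type} (p : α) (l : List α) : PySem.List.pyGet? (p :: l) 0 = some p := by
  have h := PySem.List.pyGet?_natCast (p :: l) 0
  simp only [Nat.cast_zero] at h
  simp [h]

-- the winner: A's index-of-max is the head of B's ranking, parsed back to an index
lemma pvTop (votes : List Int) (h32 : votes.length = 32) :
    (match PySem.List.max? votes (fun y => y) with
     | some m =>
       match PySem.List.index? votes m with
       | some k => (k : Int)
       | none => 0
     | none => 0)
    = (match PySem.List.pyGet?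
          ((PySem.List.sorted (PySem.Set.ofList votes) (fun s => s) true).flatMap
            (fun s => (((PySem.List.pyRange 0 32 1).zip votes).map
                (fun cv => (PySem.Int.toStr cv.1, cv.2))).filter (fun p => p.2 == s))) 0 with
       | some p =>
         match PySem.Int.ofStr? p.1 with
         | some k => k
         | none => 0
       | none => 0) := by
  have hne : votes ≠ [] := by intro h; rw [h] at h32; simp at h32
  -- the maximum M and its first position k
  cases hmax : PySem.List.max? votes (fun y => y) with
  | none => exact absurd ((PySem.List.max?_eq_none_iff _ _).mp hmax) hne
  | some M =>
  have hMmem : M ∈ votes := PySem.List.max?_mem hmax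
  have hMmax : ∀ y ∈ votes, y ≤ M := PySem.List.max?_isMax hmax
  cases hidx : PySem.List.index? votes M with
  | none =>
    rw [PySem.List.index?_eq_idxOf?] at hidx
    exact absurd hidx (by simpa using hMmem)
  | some k =>
  obtain ⟨pre, suf, hsplit, hklen, hMpre⟩ := (PySem.List.index?_eq_some_iff _ _ _).mp hidx
  have hk32 : k < 32 := by
    have := congrArg List.length hsplit
    simp at this
    omega
  -- the head of the descending distinct-score list is M
  cases hD : PySem.List.sorted (PySem.Set.ofList votes) (fun s : Int => s) true with
  | nil =>
    have : M ∈ PySem.List.sorted (PySem.Set.ofList votes) (fun s : Int => s) true :=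
      (PySem.List.mem_sorted _ _ _ _).mpr ((PySem.Set.mem_ofList _ _).mpr hMmem)
    rw [hD] at this
    simp at this
  | cons d D₂ =>
  have hdM : d = M := by
    have hd_mem : d ∈ votes := by
      have : d ∈ PySem.List.sorted (PySem.Set.ofList votes) (fun s : Int => s) true := by
        rw [hD]; simp
      exact (PySem.Set.mem_ofList _ _).mp ((PySem.List.mem_sorted _ _ _ _).mp this)
    have hge : M ≤ d :=
      PySem.List.key_head_sorted_rev_ge _ _ hD M ((PySem.Set.mem_ofList _ _).mpr hMmem)
    exact le_antisymm (hMmax d hd_mem) hge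
  -- split the index range at k
  have hRlen : (PySem.List.pyRange 0 32 1).length = 32 := by decide
  have hRget : ∀ j : Nat, j < 32 → (PySem.List.pyRange 0 32 1).getD j 0 = (j : Int) := by decide
  have hkR : k < (PySem.List.pyRange 0 32 1).length := by rw [hRlen]; exact hk32
  have hRk : (PySem.List.pyRange 0 32 1)[k] = (k : Int) := by
    rw [← List.getD_eq_getElem _ 0 hkR]
    exact hRget k hk32
  have hpre_len : (((PySem.List.pyRange 0 32 1).take k).length) = pre.length := by
    rw [List.length_take, hRlen, hklen]
    omega
  have hzip : (PySem.List.pyRange 0 32 1).zip votes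
      = ((PySem.List.pyRange 0 32 1).take k).zip pre
        ++ (((k : Int), M) :: ((PySem.List.pyRange 0 32 1).drop (k + 1)).zip suf) := by
    conv_lhs => rw [hsplit, ← List.take_append_drop k (PySem.List.pyRange 0 32 1)]
    rw [List.zip_append hpre_len, List.drop_eq_getElem_cons hkR, hRk]
    rfl
  -- everything strictly before position k scores below M, so it is filtered out
  have hfilter_pre : ((((PySem.List.pyRange 0 32 1).take k).zip pre).map
      (fun cv => (PySem.Int.toStr cv.1, cv.2))).filter (fun p => p.2 == M) = [] := by
    refine List.filter_eq_nil_iff.mpr ?_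
    intro p hp
    rcases List.mem_map.mp hp with ⟨cv, hcv, rfl⟩
    have : cv.2 ∈ pre := by
      rcases cv with ⟨c, v⟩
      exact (List.of_mem_zip hcv).2
    simp only [beq_iff_eq]
    intro hEq
    exact hMpre (hEq ▸ this)
  have hhead : ((((PySem.List.pyRange 0 32 1).zip votes).map
      (fun cv => (PySem.Int.toStr cv.1, cv.2))).filter (fun p => p.2 == M))
      = (PySem.Int.toStr (k : Int), M)
        :: ((((PySem.List.pyRange 0 32 1).drop (k + 1)).zip suf).map
            (fun cv => (PySem.Int.toStr cv.1, cv.2))).filter (fun p => p.2 == M) := by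
    rw [hzip]
    rw [List.map_append, List.filter_append, hfilter_pre, List.nil_append, List.map_cons]
    rw [List.filter_cons_of_pos (by simp)]
  have hparse : PySem.Int.ofStr? (PySem.Int.toStr (k : Int)) = some (k : Int) := by
    have : ∀ j : Nat, j < 32 → PySem.Int.ofStr? (PySem.Int.toStr (j : Int)) = some (j : Int) := by
      decide
    exact this k hk32
  trans ((k : Nat) : Int)
  · show (match PySem.List.index? votes M with
      | some j => (j : Int)
      | none => 0) = ((k : Nat) : Int)
    rw [hidx]
  · symm
    rw [hdM, List.flatMap_cons, hhead, List.cons_append, pvGet0]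
    show (match PySem.Int.ofStr? (PySem.Int.toStr (k : Int)) with
      | some j => j
      | none => 0) = ((k : Nat) : Int)
    rw [hparse]
-- ===== VERDICT (by name: the statement is the Claim_ definition above) =====
theorem combine_all_predictions_spec : Claim_equal_combine_all_predictions := by
  intro tp tc cp kp mp ep tw _ _
  unfold Spec_combine_all_predictions combine_all_predictions combine_all_predictions_alt
  dsimp only
  rw [pvVotes_foldl]
  have hv0 : PySem.List.pyRepeat [(0 : Int)] (((PySem.List.pyRange 0 32 1).length : Nat) : Int)
      = PySem.List.pyRepeat [(0 : Int)]
          ((((PySem.List.pyRange 0 32 1).map (fun cluster => PySem.Int.toStr cluster)).length : Nat) : Int) := by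
    decide
  rw [hv0]
  have h32 : (pvBump (pvBump (pvBump (pvBump (pvBump
      (PySem.List.pyRepeat [(0 : Int)]
        ((((PySem.List.pyRange 0 32 1).map (fun cluster => PySem.Int.toStr cluster)).length : Nat) : Int))
      tp tw) cp 1) kp 1) mp 1) ep 1).length = 32 := by
    simp only [pvBump_length]
    decide
  rw [pvRanked _ h32, pvTop _ h32]
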